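-- pv_equiv track=rewrite | github.com/juanfelipehdezm/Big-Data | Python 3/2. Python Functions,Files and Dict/while.py | beginning
-- ===== SOURCE A (Python) =====
-- def beginning(alist):
--     idx = 0
--     lst = list()
--     while idx < len(alist) and alist[idx] != "bye":
--         lst.append(alist[idx])
--         idx += 1
--     if len(lst) > 10:
--         return lst[:11]
--     else:
--         return lst
-- ===== SOURCE B (Python) =====
-- def beginning(alist):
--     cut = next((i for i, x in enumerate(alist) if x == "bye"), len(alist))
--     return list(alist[:min(cut, 11)])
-- ===== Notes on version B (the rewrite author's own statement) =====
-- stated objective: simpler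
-- what changed: Replaces the index-counting while loop with per-element append and the post-hoc truncation branch by a locate-then-copy two-phase pass: find the cut index of the first 'bye' (or len) and return a single slice capped at 11.
import Mathlib
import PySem

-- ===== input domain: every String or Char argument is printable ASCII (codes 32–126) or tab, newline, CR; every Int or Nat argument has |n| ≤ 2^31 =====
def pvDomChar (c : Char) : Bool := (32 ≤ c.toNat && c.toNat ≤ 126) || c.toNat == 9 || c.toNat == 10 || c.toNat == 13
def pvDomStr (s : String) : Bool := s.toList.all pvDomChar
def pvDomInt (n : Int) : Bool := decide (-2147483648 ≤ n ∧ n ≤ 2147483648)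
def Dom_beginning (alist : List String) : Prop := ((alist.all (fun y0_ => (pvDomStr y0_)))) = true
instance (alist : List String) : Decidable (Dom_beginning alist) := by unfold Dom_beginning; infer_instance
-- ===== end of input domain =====

-- B replaces the while-loop accumulation and truncation branch by locate-the-cut-then-slice (simpler decomposition; same cost).

-- ===== PORT A =====
-- the while loop: append alist[idx] while idx in range and alist[idx] != "bye"
def beginningLoop (alist : List String) (idx : Nat) (lst : List String) : List String :=
  if _h : idx < alist.length ∧ alist[idx]! ≠ "bye" then
    beginningLoop alist (idx + 1) (lst ++ [alist[idx]!])
  else lst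
termination_by alist.length - idx
decreasing_by omega

def beginning (alist : List String) : List String :=
  let lst := beginningLoop alist 0 []
  if lst.length > 10 then lst.take 11 else lst

-- ===== PORT B =====
def beginning_alt (alist : List String) : List String :=
  let cut := (List.findIdx? (fun x => x == "bye") alist).getD alist.length
  alist.take (min cut 11)

-- ===== PRECONDITION & SPEC =====
def Spec_beginning (alist : List String) (out : List String) : Prop := out = beginning_alt alist
instance (alist : List String) (out : List String) : Decidable (Spec_beginning alist out) := by unfold Spec_beginning; infer_instance

-- ===== CLAIM (what is proved, stated in full; the proofs are below) =====
def Claim_equal_beginning : Prop := ∀ (alist : List String), Dom_beginning alist → Spec_beginning alist (beginning alist)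

-- ===== LEMMAS AND PROOFS =====

theorem beginningLoop_eq (alist : List String) (idx : Nat) (lst : List String) :
    beginningLoop alist idx lst = lst ++ (alist.drop idx).takeWhile (fun x => x ≠ "bye") := by
  induction idx, lst using beginningLoop.induct alist with
  | case1 idx lst h ih =>
    rw [beginningLoop, dif_pos h, ih]
    have hd : alist.drop idx = alist[idx]! :: alist.drop (idx + 1) := by
      rw [getElem!_pos alist idx h.1]
      exact (List.drop_eq_getElem_cons h.1)
    rw [hd, List.takeWhile_cons, if_pos (by simpa using h.2)]
    simp
  | case2 idx lst h =>
    rw [beginningLoop, dif_neg h]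
    rcases Nat.lt_or_ge idx alist.length with hlt | hge
    · have : alist[idx]! = "bye" := by
        by_contra hc; exact h ⟨hlt, hc⟩
      have hd : alist.drop idx = alist[idx]! :: alist.drop (idx + 1) := by
        rw [getElem!_pos alist idx hlt]
        exact (List.drop_eq_getElem_cons hlt)
      rw [hd, List.takeWhile_cons, if_neg (by simpa using this)]
      simp
    · rw [List.drop_eq_nil_of_le hge]; simp

theorem takeWhile_eq_take_cut (alist : List String) :
    alist.takeWhile (fun x => x ≠ "bye") =
      alist.take ((List.findIdx? (fun x => x == "bye") alist).getD alist.length) := by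
  induction alist with
  | nil => simp
  | cons a as ih =>
    by_cases hb : a = "bye"
    · subst hb
      simp [List.findIdx?_cons]
    · rw [List.takeWhile_cons, if_pos (by simpa using hb)]
      rw [List.findIdx?_cons]
      simp only [beq_iff_eq, hb, if_false]
      cases hfi : List.findIdx? (fun x => x == "bye") as with
      | none => simpa [hfi] using ih
      | some i => simpa [hfi] using ih

theorem trunc_eq_take_min (l : List String) (cut : Nat) :
    (if (l.take cut).length > 10 then (l.take cut).take 11 else l.take cut) =
      l.take (min cut 11) := by
  by_cases h : (l.take cut).length > 10
  · rw [if_pos h, List.take_take]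
    congr 1
    simp only [List.length_take] at h
    omega
  · rw [if_neg h]
    simp only [List.length_take] at h
    rcases Nat.lt_or_ge cut 11 with h1 | h1
    · rw [Nat.min_eq_left (by omega)]
    · rw [Nat.min_eq_right h1,
        List.take_of_length_le (le_of_lt (by omega : l.length < cut)),
        List.take_of_length_le (by omega : l.length ≤ 11)]

-- ===== VERDICT (by name: the statement is the Claim_ definition above) =====
theorem beginning_spec : Claim_equal_beginning := by
  intro alist _
  unfold Spec_beginning beginning beginning_alt
  rw [beginningLoop_eq, List.drop_zero, List.nil_append, takeWhile_eq_take_cut]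
  exact trunc_eq_take_min alist _
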